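-- pv_equiv track=rewrite | github.com/gautier-g/cobol_generator | try/cobolsmartgen1/generate/cobol_procedures.py | _order_ws_lines_for_prompt
-- ===== SOURCE A (Python) =====
-- from typing import Dict, List
--
-- def _order_ws_lines_for_prompt(ws_lines: List[str], prefer_sqlca_first: bool) -> List[str]:
--     if not prefer_sqlca_first or not ws_lines:
--         return ws_lines
--     sqlca_lines = []
--     other_lines = []
--     for line in ws_lines:
--         if isinstance(line, str) and "EXEC SQL INCLUDE SQLCA" in line.upper():
--             sqlca_lines.append(line)
--         else:
--             other_lines.append(line)
--     return sqlca_lines + other_lines if sqlca_lines else ws_lines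
-- ===== SOURCE B (Python) =====
-- def _order_ws_lines_for_prompt(ws_lines, prefer_sqlca_first):
--     if not prefer_sqlca_first or not ws_lines:
--         return ws_lines
--     return sorted(
--         ws_lines,
--         key=lambda line: 0
--         if isinstance(line, str) and "EXEC SQL INCLUDE SQLCA" in line.upper()
--         else 1,
--     )
-- ===== Notes on version B (the rewrite author's own statement) =====
-- stated objective: simpler
-- what changed: Replaces the manual two-list partition and conditional concatenation with a single stable sort on a 0/1 key; stability preserves relative order within each group, so the value is identical.
import Mathlib
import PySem

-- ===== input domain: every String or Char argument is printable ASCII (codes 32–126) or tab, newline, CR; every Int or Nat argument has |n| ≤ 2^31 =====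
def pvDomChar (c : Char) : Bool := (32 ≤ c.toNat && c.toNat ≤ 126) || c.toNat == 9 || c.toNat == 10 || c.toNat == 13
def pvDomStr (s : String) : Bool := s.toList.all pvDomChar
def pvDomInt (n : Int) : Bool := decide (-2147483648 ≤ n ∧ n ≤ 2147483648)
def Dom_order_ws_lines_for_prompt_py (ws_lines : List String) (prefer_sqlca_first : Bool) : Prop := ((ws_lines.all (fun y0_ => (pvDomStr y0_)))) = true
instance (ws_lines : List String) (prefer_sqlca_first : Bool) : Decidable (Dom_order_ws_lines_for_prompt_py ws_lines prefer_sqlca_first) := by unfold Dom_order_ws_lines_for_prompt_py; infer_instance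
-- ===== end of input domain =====

-- B replaces A's manual two-list partition with one stable sort on a 0/1 key (objective: simpler).

-- ===== PORT A =====
-- "EXEC SQL INCLUDE SQLCA" in line.upper()  (isinstance(line, str) is always true under the type convention)
def pvIsSqlca (line : String) : Bool :=
  PySem.Str.isIn "EXEC SQL INCLUDE SQLCA" (PySem.Str.upper line)

def order_ws_lines_for_prompt_py (ws_lines : List String) (prefer_sqlca_first : Bool) : List String :=
  if !prefer_sqlca_first || ws_lines.isEmpty then ws_lines
  else
    let p := ws_lines.foldl
      (fun (acc : List String × List String) line =>
        if pvIsSqlca line then (acc.1 ++ [line], acc.2) else (acc.1, acc.2 ++ [line]))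
      ([], [])
    if p.1 ≠ [] then p.1 ++ p.2 else ws_lines

-- ===== PORT B =====
-- lambda line: 0 if ... in line.upper() else 1
def pvSqlcaKey (line : String) : Int :=
  if PySem.Str.isIn "EXEC SQL INCLUDE SQLCA" (PySem.Str.upper line) then 0 else 1

def order_ws_lines_for_prompt_py_alt (ws_lines : List String) (prefer_sqlca_first : Bool) : List String :=
  if !prefer_sqlca_first || ws_lines.isEmpty then ws_lines
  else PySem.List.sorted ws_lines pvSqlcaKey false

-- ===== PRECONDITION & SPEC =====
def Spec_order_ws_lines_for_prompt_py (ws_lines : List String) (prefer_sqlca_first : Bool) (out : List String) : Prop := out = order_ws_lines_for_prompt_py_alt ws_lines prefer_sqlca_first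
instance (ws_lines : List String) (prefer_sqlca_first : Bool) (out : List String) : Decidable (Spec_order_ws_lines_for_prompt_py ws_lines prefer_sqlca_first out) := by unfold Spec_order_ws_lines_for_prompt_py; infer_instance

-- ===== CLAIM (what is proved, stated in full; the proofs are below) =====
def Claim_equal_order_ws_lines_for_prompt_py : Prop := ∀ (ws_lines : List String) (prefer_sqlca_first : Bool), Dom_order_ws_lines_for_prompt_py ws_lines prefer_sqlca_first → Spec_order_ws_lines_for_prompt_py ws_lines prefer_sqlca_first (order_ws_lines_for_prompt_py ws_lines prefer_sqlca_first)

-- ===== LEMMAS AND PROOFS =====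

-- inserting an element whose key beats the head of the tail block lands right between the blocks
theorem insertBy_between (before : String → String → Bool) (x b : String) (A rest : List String)
    (hA : ∀ a ∈ A, before x a = false) (hb : before x b = true) :
    PySem.List.insertBy before x (A ++ b :: rest) = A ++ x :: b :: rest := by
  induction A with
  | nil => simp [PySem.List.insertBy, hb]
  | cons a A ih =>
      have ha : before x a = false := hA a (by simp)
      simp only [List.cons_append, PySem.List.insertBy, ha]
      simp [ih (fun a ha' => hA a (by simp [ha']))]

-- the insertion-sort fold with a 0/1 key maintains "zeros-block ++ ones-block"
theorem foldl_insert_partition (xs : List String) : ∀ (A B : List String),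
    (∀ a ∈ A, pvIsSqlca a = true) → (∀ b ∈ B, pvIsSqlca b = false) →
    xs.foldl (fun acc x => PySem.List.insertBy (fun a b => decide (pvSqlcaKey a < pvSqlcaKey b)) x acc) (A ++ B)
      = (A ++ xs.filter pvIsSqlca) ++ (B ++ xs.filter (fun l => !pvIsSqlca l)) := by
  induction xs with
  | nil => intro A B _ _; simp
  | cons x xs ih =>
      intro A B hA hB
      simp only [List.foldl_cons]
      by_cases hx : pvIsSqlca x = true
      · have hkx : pvSqlcaKey x = 0 := by simp [pvSqlcaKey, pvIsSqlca] at hx ⊢; simp [hx]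
        have hstep : PySem.List.insertBy (fun a b => decide (pvSqlcaKey a < pvSqlcaKey b)) x (A ++ B)
            = (A ++ [x]) ++ B := by
          cases B with
          | nil =>
              simp only [List.append_nil]
              exact PySem.List.insertBy_of_forall_not_before _ x A (fun a ha => by
                have : pvSqlcaKey a = 0 := by
                  have := hA a ha
                  simp [pvSqlcaKey, pvIsSqlca] at this ⊢; simp [this]
                simp [hkx, this])
          | cons b rest =>
              have hkb : pvSqlcaKey b = 1 := by
                have := hB b (by simp)
                simp [pvSqlcaKey, pvIsSqlca] at this ⊢; simp [this]
              rw [insertBy_between _ x b A rest (fun a ha => by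
                    have : pvSqlcaKey a = 0 := by
                      have := hA a ha
                      simp [pvSqlcaKey, pvIsSqlca] at this ⊢; simp [this]
                    simp [hkx, this]) (by simp [hkx, hkb])]
              simp
        rw [hstep, ih (A ++ [x]) B (by intro a ha; rcases List.mem_append.1 ha with h | h
                                       · exact hA a h
                                       · simp at h; simpa [h] using hx) hB]
        simp [hx]
      · have hx' : pvIsSqlca x = false := by simpa using hx
        have hkx : pvSqlcaKey x = 1 := by
          simp [pvSqlcaKey, pvIsSqlca] at hx' ⊢; simp [hx']
        have hstep : PySem.List.insertBy (fun a b => decide (pvSqlcaKey a < pvSqlcaKey b)) x (A ++ B)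
            = A ++ (B ++ [x]) := by
          rw [PySem.List.insertBy_of_forall_not_before _ x (A ++ B) (fun y _ => by
            have : pvSqlcaKey y = 0 ∨ pvSqlcaKey y = 1 := by
              by_cases h : pvIsSqlca y = true <;>
                simp [pvSqlcaKey, pvIsSqlca] at h ⊢ <;> simp [h]
            rcases this with h | h <;> simp [hkx, h])]
          simp
        rw [hstep, ih A (B ++ [x]) hA (by intro b hb; rcases List.mem_append.1 hb with h | h
                                          · exact hB b h
                                          · simp at h; simpa [h] using hx')]
        simp [hx']

-- the stable 0/1-key sort IS the partition
theorem sorted_eq_partition (xs : List String) :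
    PySem.List.sorted xs pvSqlcaKey false = xs.filter pvIsSqlca ++ xs.filter (fun l => !pvIsSqlca l) := by
  rw [PySem.List.sorted_eq_foldl_insertBy]
  simpa using foldl_insert_partition xs [] [] (by simp) (by simp)

-- A's accumulator fold is the same partition
theorem foldl_pair_partition (xs : List String) : ∀ (A B : List String),
    xs.foldl (fun (acc : List String × List String) line =>
        if pvIsSqlca line then (acc.1 ++ [line], acc.2) else (acc.1, acc.2 ++ [line])) (A, B)
      = (A ++ xs.filter pvIsSqlca, B ++ xs.filter (fun l => !pvIsSqlca l)) := by
  induction xs with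
  | nil => intro A B; simp
  | cons x xs ih =>
      intro A B
      by_cases hx : pvIsSqlca x = true
      · simp [hx, ih]
      · have hx' : pvIsSqlca x = false := by simpa using hx
        simp [hx', ih]

-- ===== VERDICT =====
theorem order_ws_lines_for_prompt_py_spec : Claim_equal_order_ws_lines_for_prompt_py := by
  intro ws prefer _
  unfold Spec_order_ws_lines_for_prompt_py order_ws_lines_for_prompt_py order_ws_lines_for_prompt_py_alt
  by_cases hg : (!prefer || ws.isEmpty) = true
  · simp [hg]
  · rw [if_neg hg, if_neg hg]
    rw [sorted_eq_partition]
    have hp := foldl_pair_partition ws [] []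
    simp only [List.nil_append] at hp
    rw [hp]
    by_cases hz : ws.filter pvIsSqlca = []
    · have : ws.filter (fun l => !pvIsSqlca l) = ws := by
        rw [List.filter_eq_self]
        intro a ha
        have := List.filter_eq_nil_iff.1 hz a ha
        simpa using this
      simp [hz, this]
    · simp [hz]
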